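-- pv_equiv track=rewrite | github.com/RobbeW/Data_Statistiek_R | Deel 3 Algoritmiek/02 Dictionaries/11 Coole woorden/solution/solution.nl.py | cool
-- ===== SOURCE A (Python) =====
-- def cool(woord):
--     tabel = {}
--     for char in woord:
--         if char in tabel:
--             tabel[char] += 1
--         else:
--             tabel[char] = 1
--
--     is_cool = True
--     aantallen = []
--     for sleutel in tabel:
--         aantal = tabel[sleutel]
--         if aantal in aantallen:
--             is_cool = False
--         else:
--             aantallen.append(aantal)
--
--     return is_cool
-- ===== SOURCE B (Python) =====
-- def cool(woord):
--     tabel = {}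
--     for char in woord:
--         tabel[char] = tabel.get(char, 0) + 1
--     counts = sorted(tabel.values())
--     return all(a != b for a, b in zip(counts, counts[1:]))
-- ===== Notes on version B (the rewrite author's own statement) =====
-- stated objective: alternative
-- what changed: The distinctness check over the character counts is replaced: instead of scanning a growing list of seen counts for each key, B sorts the counts once and makes a single pass comparing adjacent elements.
import Mathlib
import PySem

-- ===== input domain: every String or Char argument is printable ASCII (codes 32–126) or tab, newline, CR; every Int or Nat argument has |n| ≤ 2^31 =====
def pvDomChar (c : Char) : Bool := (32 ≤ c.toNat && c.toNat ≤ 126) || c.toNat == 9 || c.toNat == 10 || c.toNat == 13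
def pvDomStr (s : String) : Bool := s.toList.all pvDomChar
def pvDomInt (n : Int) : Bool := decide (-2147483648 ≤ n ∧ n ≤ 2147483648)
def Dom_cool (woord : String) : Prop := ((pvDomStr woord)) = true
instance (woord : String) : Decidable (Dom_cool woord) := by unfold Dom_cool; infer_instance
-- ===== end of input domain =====

-- B replaces A's quadratic growing-list membership scan over the counts by sort-then-adjacent-compare (alternative decomposition).

-- ===== PORT A =====
def cool (woord : String) : Bool :=
  let tabel := woord.toList.foldl
    (fun tabel char =>
      if tabel.contains char then tabel.modify char 0 (· + 1) else tabel.insert char 1)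
    (PySem.Dict.empty : PySem.Dict Char Int)
  let r := tabel.keys.foldl
    (fun (st : Bool × List Int) sleutel =>
      -- tabel[sleutel]: sleutel comes from tabel's keys, so the lookup always succeeds
      let aantal := (tabel.get? sleutel).getD 0
      if aantal ∈ st.2 then (false, st.2) else (st.1, st.2 ++ [aantal]))
    (true, ([] : List Int))
  r.1

-- ===== PORT B =====
def cool_alt (woord : String) : Bool :=
  let tabel := woord.toList.foldl
    (fun d c => d.insert c (d.getD c 0 + 1)) (PySem.Dict.empty : PySem.Dict Char Int)
  let counts := PySem.List.sorted tabel.values (fun x => x) false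
  (counts.zip counts.tail).all (fun p => !(p.1 == p.2))

-- ===== PRECONDITION & SPEC =====
def Spec_cool (woord : String) (out : Bool) : Prop := out = cool_alt woord
instance (woord : String) (out : Bool) : Decidable (Spec_cool woord out) := by unfold Spec_cool; infer_instance

-- ===== CLAIM (what is proved, stated in full; the proofs are below) =====
def Claim_equal_cool : Prop := ∀ (woord : String), Dom_cool woord → Spec_cool woord (cool woord)

-- ===== LEMMAS AND PROOFS =====

-- A's dict-building step equals the counter step
lemma stepA_eq_counter (d : PySem.Dict Char Int) (c : Char) :
    (if d.contains c then d.modify c 0 (· + 1) else d.insert c 1) = d.modify c 0 (· + 1) := by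
  by_cases h : d.contains c = true
  · simp [h]
  · simp only [h, Bool.false_eq_true, if_false]
    have h0 := PySem.Dict.getD_of_not_contains (d := d) (k := c) (d0 := (0 : Int)) (by simpa using h)
    rw [show d.modify c 0 (· + 1) = d.insert c (d.getD c 0 + 1) from rfl, h0]
    norm_num

-- both builds give counter
lemma dicts_eq (l : List Char) :
    l.foldl (fun tabel char =>
      if tabel.contains char then tabel.modify char 0 (· + 1) else tabel.insert char 1)
      (PySem.Dict.empty : PySem.Dict Char Int)
    = l.foldl (fun d c => d.insert c (d.getD c 0 + 1)) PySem.Dict.empty := by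
  have hf : (fun (tabel : PySem.Dict Char Int) char =>
      if tabel.contains char then tabel.modify char 0 (· + 1) else tabel.insert char 1)
      = (fun (d : PySem.Dict Char Int) c => d.insert c (d.getD c 0 + 1)) := by
    funext d c
    rw [stepA_eq_counter]; rfl
  rw [hf]

-- looking each key up reproduces the values list
lemma map_get_keys (l : List (Char × Int)) (h : (l.map Prod.fst).Nodup) :
    (l.map Prod.fst).map (fun k => ((PySem.Dict.mk l).get? k).getD 0) = l.map Prod.snd := by
  induction l with
  | nil => rfl
  | cons p rest ih =>
    obtain ⟨kv, v⟩ := p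
    simp only [List.map_cons, List.nodup_cons] at h ⊢
    obtain ⟨hnot, hrest⟩ := h
    congr 1
    · simp [PySem.Dict.get?_mk_cons]
    · rw [← ih hrest]
      apply List.map_congr_left
      intro k hk
      have hne : kv ≠ k := fun he => hnot (he ▸ hk)
      simp [PySem.Dict.get?_mk_cons, hne]

-- A's second loop computes Nodup of the visited list
lemma loopA (l : List Int) (b : Bool) (s : List Int) (hs : s.Nodup) :
    (l.foldl (fun (st : Bool × List Int) a =>
        if a ∈ st.2 then (false, st.2) else (st.1, st.2 ++ [a])) (b, s)).1
    = (b && decide (s ++ l).Nodup) := by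
  induction l generalizing b s with
  | nil => simp [hs]
  | cons a t ih =>
    simp only [List.foldl_cons]
    by_cases ha : a ∈ s
    · have hnot : ¬ (s ++ a :: t).Nodup := fun h => by
        rcases List.nodup_append.mp h with ⟨-, -, hd⟩
        exact hd a ha a (by simp) rfl
      simp only [ha, if_pos]
      rw [ih false s hs]
      simp [hnot]
    · have hsa : (s ++ [a]).Nodup := by
        rw [List.nodup_append]
        refine ⟨hs, List.nodup_singleton a, ?_⟩
        intro x hx y hy
        simp only [List.mem_singleton] at hy
        subst hy
        exact fun e => ha (e ▸ hx)
      simp only [ha, if_neg, not_false_iff]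
      rw [ih b (s ++ [a]) hsa, List.append_assoc, List.singleton_append]

-- B's adjacent scan on a ≤-sorted list decides Nodup
lemma noAdj_sorted (l : List Int) (h : l.Pairwise (· ≤ ·)) :
    ((l.zip l.tail).all (fun p => !(p.1 == p.2)) = true) ↔ l.Nodup := by
  induction l with
  | nil => simp
  | cons a t ih =>
    cases t with
    | nil => simp
    | cons b t2 =>
      rcases List.pairwise_cons.mp h with ⟨hab, htail⟩
      have hb : a ≤ b := hab b (by simp)
      rcases List.pairwise_cons.mp htail with ⟨hbt, -⟩
      simp only [List.tail_cons, List.zip_cons_cons, List.all_cons, Bool.and_eq_true,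
        Bool.not_eq_eq_eq_not, Bool.not_true, beq_eq_false_iff_ne, ne_eq]
      rw [show ((b :: t2).zip (b :: t2).tail) = ((b :: t2).zip t2) from rfl] at ih
      rw [ih htail]
      constructor
      · rintro ⟨hne, hnd⟩
        refine List.nodup_cons.mpr ⟨?_, hnd⟩
        intro hmem
        rcases List.mem_cons.mp hmem with rfl | hm
        · exact hne rfl
        · have hba : b ≤ a := hbt a hm
          exact hne (le_antisymm hb hba)
      · intro hnd
        rcases List.nodup_cons.mp hnd with ⟨hnm, hnd2⟩
        exact ⟨fun e => hnm (e ▸ List.mem_cons_self), hnd2⟩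

-- the whole second halves agree for any dict with distinct keys
lemma side_eq (d : PySem.Dict Char Int) (hk : d.keys.Nodup) :
    (d.keys.foldl (fun (st : Bool × List Int) sleutel =>
        let aantal := (d.get? sleutel).getD 0
        if aantal ∈ st.2 then (false, st.2) else (st.1, st.2 ++ [aantal])) (true, ([] : List Int))).1
    = ((PySem.List.sorted d.values (fun x => x) false).zip
        (PySem.List.sorted d.values (fun x => x) false).tail).all (fun p => !(p.1 == p.2)) := by
  obtain ⟨items⟩ := d
  simp only [PySem.Dict.keys_mk, PySem.Dict.values_mk] at hk ⊢
  rw [show (fun (st : Bool × List Int) sleutel =>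
        let aantal := ((PySem.Dict.mk items).get? sleutel).getD 0
        if aantal ∈ st.2 then (false, st.2) else (st.1, st.2 ++ [aantal]))
      = (fun (st : Bool × List Int) sleutel =>
        if ((PySem.Dict.mk items).get? sleutel).getD 0 ∈ st.2 then (false, st.2)
        else (st.1, st.2 ++ [((PySem.Dict.mk items).get? sleutel).getD 0])) from rfl,
    ← List.foldl_map (f := fun k => ((PySem.Dict.mk items).get? k).getD 0)
      (g := fun (st : Bool × List Int) a =>
        if a ∈ st.2 then (false, st.2) else (st.1, st.2 ++ [a])),
    map_get_keys items hk, loopA _ true [] List.nodup_nil]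
  rw [Bool.eq_iff_iff]
  have hpw : (PySem.List.sorted (items.map Prod.snd) (fun x => x) false).Pairwise (· ≤ ·) := by
    have := PySem.List.sorted_pairwise (xs := items.map Prod.snd) (key := fun x => x)
    simpa using this
  rw [noAdj_sorted _ hpw,
    (PySem.List.sorted_perm (xs := items.map Prod.snd) (key := fun x => x) (rev := false)).nodup_iff]
  simp

-- ===== VERDICT (by name: the statement is the Claim_ definition above) =====
theorem cool_spec : Claim_equal_cool := by
  intro woord _hd
  unfold Spec_cool cool cool_alt
  rw [dicts_eq]
  exact side_eq _ (by
    rw [show woord.toList.foldl (fun d c => d.insert c (d.getD c 0 + 1)) PySem.Dict.empty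
        = PySem.Dict.counter woord.toList from rfl]
    exact PySem.Dict.nodup_keys_counter _)
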